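-- pv_equiv track=rewrite | github.com/kdotndot/cs177_hw5 | hw5_ecb.py | pad_and_sep
-- ===== SOURCE A (Python) =====
-- def pad_and_sep(bytes):
--     length = len(bytes)
--     for i in range(0, length, 16):
--         if length - i < 16:
--             temp = bytes[i:i + 16]
--             pad = 16 - len(temp)
--             for x in range(0, pad):
--                 temp.append(pad)
--             yield temp
--         else:
--             yield (bytes[i:i + 16])
-- ===== SOURCE B (Python) =====
-- def pad_and_sep(bytes):
--     length = len(bytes)
--     pad = 0 if length % 16 == 0 else 16 - (length % 16)
--     data = bytes[:]
--     for _ in range(pad):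
--         data.append(pad)
--     for i in range(0, len(data), 16):
--         yield data[i:i + 16]
-- ===== Notes on version B (the rewrite author's own statement) =====
-- stated objective: simpler
-- what changed: Pads the whole input up front to a multiple of 16 (guarded by length % 16) and then chunks with one uniform branch-free slicing loop, instead of A's single loop whose short-block branch builds the padding element by element.
import Mathlib
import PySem

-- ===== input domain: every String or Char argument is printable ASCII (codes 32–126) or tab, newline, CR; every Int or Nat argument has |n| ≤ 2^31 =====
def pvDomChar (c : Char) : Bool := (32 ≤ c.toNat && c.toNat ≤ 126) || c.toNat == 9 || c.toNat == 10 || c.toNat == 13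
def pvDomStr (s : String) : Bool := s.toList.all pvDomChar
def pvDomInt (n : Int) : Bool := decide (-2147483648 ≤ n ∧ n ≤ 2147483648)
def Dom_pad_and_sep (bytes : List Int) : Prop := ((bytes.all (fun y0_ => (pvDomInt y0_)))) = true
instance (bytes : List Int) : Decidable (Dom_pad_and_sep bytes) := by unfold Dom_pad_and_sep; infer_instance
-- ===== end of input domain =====

-- B pads the whole input up front (guarded by length % 16 != 0) and then chunks with one
-- uniform branch-free slicing loop, instead of A's single loop whose short-block branch
-- builds the padding element by element; same O(n) cost. Neither mutates the argument.

-- ===== PORT A =====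
def pad_and_sep (bytes : List Int) : List (List Int) :=
  let length : Int := bytes.length
  (PySem.List.pyRange 0 length 16).map (fun i =>
    if length - i < 16 then
      let temp := PySem.List.slice bytes (some i) (some (i + 16))
      let pad : Int := 16 - temp.length
      (PySem.List.pyRange 0 pad 1).foldl (fun t _ => t ++ [pad]) temp
    else
      PySem.List.slice bytes (some i) (some (i + 16)))

-- ===== PORT B =====
def pad_and_sep_alt (bytes : List Int) : List (List Int) :=
  let length : Int := bytes.length
  let pad : Int := if PySem.Int.mod length 16 = 0 then 0 else 16 - PySem.Int.mod length 16
  let data := (PySem.List.pyRange 0 pad 1).foldl (fun d _ => d ++ [pad]) bytes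
  (PySem.List.pyRange 0 (data.length : Int) 16).map (fun i =>
    PySem.List.slice data (some i) (some (i + 16)))

-- Python `n % 16` for a Nat-sized length

-- ===== PRECONDITION & SPEC =====
def Spec_pad_and_sep (bytes : List Int) (out : List (List Int)) : Prop := out = pad_and_sep_alt bytes
instance (bytes : List Int) (out : List (List Int)) : Decidable (Spec_pad_and_sep bytes out) := by unfold Spec_pad_and_sep; infer_instance

-- ===== CLAIM (what is proved, stated in full; the proofs are below) =====
def Claim_equal_pad_and_sep : Prop := ∀ (bytes : List Int), Dom_pad_and_sep bytes → Spec_pad_and_sep bytes (pad_and_sep bytes)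

-- ===== LEMMAS AND PROOFS =====
theorem pv_foldl_pad (l : List Int) (init : List Int) (c : Int) :
    l.foldl (fun d _ => d ++ [c]) init = init ++ List.replicate l.length c := by
  induction l generalizing init with
  | nil => simp
  | cons x xs ih => simp [List.foldl_cons, ih, List.replicate_succ]

theorem pv_pyRange16_singleton (b : Int) (h1 : 0 < b) (h2 : b ≤ 16) :
    PySem.List.pyRange 0 b 16 = [0] := by
  rw [PySem.List.pyRange_of_pos 0 b (by norm_num)]
  have h3 : ((b - 0 + 16 - 1) / 16).toNat = 1 := by omega
  rw [if_pos h1, h3]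
  simp

theorem pv_pyRange16_cons (b : Int) (hb : 0 < b) :
    PySem.List.pyRange 0 b 16 = 0 :: PySem.List.pyRange 16 b 16 := by
  by_cases h : b ≤ 16
  · rw [pv_pyRange16_singleton b hb h]
    rw [PySem.List.pyRange_of_pos 16 b (by norm_num)]
    simp [show ¬ (16:Int) < b by omega]
  · rw [PySem.List.pyRange_of_pos 0 b (by norm_num),
        PySem.List.pyRange_of_pos 16 b (by norm_num)]
    have h16 : (16:Int) < b := by omega
    have hN : ((b - 0 + 16 - 1) / 16).toNat = ((b - 16 + 16 - 1) / 16).toNat + 1 := by omega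
    rw [if_pos hb, if_pos h16, hN, List.range_succ_eq_map]
    simp only [List.map_cons, List.map_map]
    refine congrArg₂ List.cons (by norm_num) ?_
    apply List.map_congr_left
    intro k _
    simp only [Function.comp, Nat.succ_eq_add_one]
    push_cast
    ring

theorem pv_map_pyRange16_shift {α : Type} (f g : Int → α) (b : Int)
    (h : ∀ k : Nat, f (16 + 16 * (k : Int)) = g (16 * (k : Int))) :
    (PySem.List.pyRange 16 (b + 16) 16).map f = (PySem.List.pyRange 0 b 16).map g := by
  rw [PySem.List.pyRange_of_pos 16 (b+16) (by norm_num),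
      PySem.List.pyRange_of_pos 0 b (by norm_num)]
  by_cases hb : 0 < b
  · rw [if_pos (show (16:Int) < b + 16 by omega), if_pos hb,
        show b + 16 - 16 + 16 - 1 = b - 0 + 16 - 1 by ring]
    simp only [List.map_map]
    apply List.map_congr_left
    intro k _
    simp only [Function.comp]
    rw [show (0:Int) + 16 * (k:Int) = 16 * (k:Int) by ring]
    exact h k
  · rw [if_neg (show ¬ (16:Int) < b + 16 by omega), if_neg hb]
    simp

theorem pv_slice_blk (xs : List Int) (j : Nat) :
    PySem.List.slice xs (some (j:Int)) (some ((j:Int)+16)) = (xs.drop j).take 16 := by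
  rw [PySem.List.slice_toNat xs (by positivity) (by positivity)]
  congr 1
  omega

theorem pv_mod16 (n : Nat) : PySem.Int.mod (n:Int) 16 = ((n % 16 : Nat) : Int) := by
  exact_mod_cast PySem.Int.mod_natCast n 16

-- the padded data of B, in closed form

theorem pv_A_step (bytes : List Int) (h : 16 ≤ bytes.length) :
    pad_and_sep bytes = bytes.take 16 :: pad_and_sep (bytes.drop 16) := by
  have hn : (0:Int) < (bytes.length : Int) := by exact_mod_cast Nat.lt_of_lt_of_le (by norm_num) h
  simp only [pad_and_sep]
  rw [pv_pyRange16_cons _ hn, List.map_cons]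
  refine congrArg₂ List.cons ?_ ?_
  · rw [if_neg (by push_cast; omega)]
    have := pv_slice_blk bytes 0
    simpa using this
  · have hlen : (bytes.length : Int) = ((bytes.drop 16).length : Int) + 16 := by
      simp [List.length_drop]; omega
    rw [hlen]
    apply pv_map_pyRange16_shift
    intro k
    have e1 : (16:Int) + 16 * (k:Int) = ((16 + 16*k : Nat) : Int) := by push_cast; ring
    have e2 : (16:Int) * (k:Int) = ((16*k : Nat) : Int) := by norm_cast
    rw [e1, e2, pv_slice_blk bytes (16+16*k), pv_slice_blk (bytes.drop 16) (16*k)]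
    rw [show ((bytes.drop 16).length : Int) + 16 - ((16 + 16*k : Nat):Int)
          = ((bytes.drop 16).length : Int) - ((16*k : Nat):Int) by push_cast; ring]
    rw [show bytes.drop (16+16*k) = (bytes.drop 16).drop (16*k) by rw [List.drop_drop]]

theorem pv_B_step (bytes : List Int) (h : 16 ≤ bytes.length) :
    pad_and_sep_alt bytes = bytes.take 16 :: pad_and_sep_alt (bytes.drop 16) := by
  simp only [pad_and_sep_alt]
  rw [pv_mod16 bytes.length, pv_mod16 (bytes.drop 16).length]
  have hm : (bytes.drop 16).length % 16 = bytes.length % 16 := by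
    rw [List.length_drop]; omega
  rw [hm]
  set p : Int := (if ((bytes.length % 16 : Nat) : Int) = 0 then 0
      else 16 - ((bytes.length % 16 : Nat) : Int)) with hp
  have hp0 : 0 ≤ p ∧ p < 16 := by
    rw [hp]; split_ifs <;> omega
  rw [pv_foldl_pad, pv_foldl_pad]
  rw [PySem.List.length_pyRange_one]
  set r := List.replicate ((p - 0).toNat) p with hr
  have hdata : bytes ++ r = bytes.take 16 ++ ((bytes.drop 16) ++ r) := by
    rw [← List.append_assoc, List.take_append_drop]
  have hdl : ((bytes ++ r).length : Int) = (((bytes.drop 16) ++ r).length : Int) + 16 := by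
    simp [List.length_append, List.length_drop]; omega
  have hpos : (0:Int) < ((bytes ++ r).length : Int) := by
    simp [List.length_append]; omega
  rw [hdl, pv_pyRange16_cons _ (by rw [← hdl]; exact hpos), List.map_cons]
  refine congrArg₂ List.cons ?_ ?_
  · rw [show (0:Int)+16 = (16:Int) by norm_num, PySem.List.slice_zero_start,
        PySem.List.slice_to _ (by norm_num)]
    exact List.take_append_of_le_length h
  · apply pv_map_pyRange16_shift
    intro k
    have e1 : (16:Int) + 16 * (k:Int) = ((16 + 16*k : Nat) : Int) := by push_cast; ring
    have e2 : (16:Int) * (k:Int) = ((16*k : Nat) : Int) := by norm_cast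
    rw [e1, e2, pv_slice_blk _ (16+16*k), pv_slice_blk _ (16*k)]
    rw [show (bytes ++ r).drop (16+16*k) = ((bytes ++ r).drop 16).drop (16*k) by rw [List.drop_drop]]
    congr 2
    exact List.drop_append_of_le_length h

theorem pv_base (bytes : List Int) (h : bytes.length < 16) :
    pad_and_sep bytes = pad_and_sep_alt bytes := by
  rcases Nat.eq_zero_or_pos bytes.length with h0 | h0
  · have hb : bytes = [] := List.eq_nil_of_length_eq_zero h0
    subst hb; decide
  · simp only [pad_and_sep, pad_and_sep_alt]
    rw [pv_mod16]
    have hm : bytes.length % 16 = bytes.length := Nat.mod_eq_of_lt h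
    rw [hm, if_neg (by exact_mod_cast Nat.pos_iff_ne_zero.mp h0)]
    rw [pv_foldl_pad, PySem.List.length_pyRange_one]
    set r := List.replicate ((16 - (bytes.length:Int) - 0).toNat) (16 - (bytes.length:Int)) with hr
    have hrl : r.length = 16 - bytes.length := by
      rw [hr, List.length_replicate]; omega
    have hdl : ((bytes ++ r).length : Int) = 16 := by
      simp [List.length_append, hrl]; omega
    rw [hdl]
    rw [pv_pyRange16_singleton _ (by exact_mod_cast h0) (by exact_mod_cast Nat.le_of_lt h),
        pv_pyRange16_singleton 16 (by norm_num) (by norm_num)]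
    simp only [List.map_cons, List.map_nil]
    rw [if_pos (by omega)]
    rw [show (0:Int)+16 = (16:Int) by norm_num, PySem.List.slice_zero_start,
        PySem.List.slice_zero_start, PySem.List.slice_to _ (by norm_num),
        PySem.List.slice_to _ (by norm_num)]
    rw [List.take_of_length_le (l := bytes) (by simpa using Nat.le_of_lt h),
        List.take_of_length_le (l := bytes ++ r) (by simp [List.length_append, hrl]; omega)]
    rw [pv_foldl_pad, PySem.List.length_pyRange_one]

theorem pv_main (bytes : List Int) : pad_and_sep bytes = pad_and_sep_alt bytes := by
  by_cases h : 16 ≤ bytes.length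
  · rw [pv_A_step bytes h, pv_B_step bytes h, pv_main (bytes.drop 16)]
  · exact pv_base bytes (by omega)
termination_by bytes.length
decreasing_by simp [List.length_drop]; omega

-- ===== VERDICT (by name: the statement is the Claim_ definition above) =====
theorem pad_and_sep_spec : Claim_equal_pad_and_sep := by
  intro bytes _
  unfold Spec_pad_and_sep
  exact pv_main bytes
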